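-- pv_equiv track=rewrite | github.com/tsnv76/Python | lesson7_5.py | key_range
-- ===== SOURCE A (Python) =====
-- def key_range(item):
--     count = 1
--     while item > 0:
--         count *= 10
--         item //= 10
--     if count == 1:
--         count = 100
--     return count
-- ===== SOURCE B (Python) =====
-- def key_range(item):
--     if item <= 0:
--         return 100
--     return 10 ** len(str(item))
-- ===== Notes on version B (the rewrite author's own statement) =====
-- stated objective: simpler
-- what changed: Replaces the digit-peeling while-loop (count *= 10; item //= 10) with a closed form: 100 for non-positive input, else 10 ** len(str(item)).
import Mathlib
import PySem

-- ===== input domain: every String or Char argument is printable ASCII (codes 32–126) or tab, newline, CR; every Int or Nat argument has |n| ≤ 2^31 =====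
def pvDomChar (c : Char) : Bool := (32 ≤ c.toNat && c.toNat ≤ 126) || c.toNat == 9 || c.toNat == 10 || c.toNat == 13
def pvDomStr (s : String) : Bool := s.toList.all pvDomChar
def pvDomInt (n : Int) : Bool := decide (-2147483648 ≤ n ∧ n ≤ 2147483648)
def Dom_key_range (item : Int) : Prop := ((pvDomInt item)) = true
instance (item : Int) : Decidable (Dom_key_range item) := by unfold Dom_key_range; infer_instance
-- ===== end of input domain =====

-- B replaces the digit-peeling while-loop with a closed form: 100 for non-positive
-- input, else 10 ** len(str(item)); objective: simpler.

-- ===== PORT A =====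
-- A's while-loop: while item > 0: count *= 10; item //= 10
def keyLoop (item count : Int) : Int :=
  if 0 < item then keyLoop (PySem.Int.floordiv item 10) (count * 10) else count
  termination_by item.toNat
  decreasing_by
    have h10 : PySem.Int.floordiv item 10 = Int.fdiv item 10 := rfl
    have : Int.fdiv item 10 < item := by
      rw [Int.fdiv_eq_ediv_of_nonneg _ (by norm_num)]
      omega
    omega

def key_range (item : Int) : Int :=
  let count := keyLoop item 1
  if count = 1 then 100 else count

-- ===== PORT B =====
def key_range_alt (item : Int) : Int :=
  if item ≤ 0 then 100
  else 10 ^ (PySem.Str.len (PySem.Int.toStr item)).toNat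

-- ===== PRECONDITION & SPEC =====
def Spec_key_range (item : Int) (out : Int) : Prop := out = key_range_alt item
instance (item : Int) (out : Int) : Decidable (Spec_key_range item out) := by unfold Spec_key_range; infer_instance

-- ===== CLAIM (what is proved, stated in full; the proofs are below) =====
def Claim_equal_key_range : Prop := ∀ (item : Int), Dom_key_range item → Spec_key_range item (key_range item)

-- ===== LEMMAS AND PROOFS =====

-- Nat.toDigitsCore is fuel-indexed; its value does not depend on the fuel once sufficient.
lemma toDigitsCore_fuel (f : Nat) : ∀ (f' n : Nat) (l : List Char), n < f → n < f' →
    Nat.toDigitsCore 10 f n l = Nat.toDigitsCore 10 f' n l := by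
  induction f with
  | zero => intro f' n l h; omega
  | succ f ih =>
    intro f' n l h h'
    cases f' with
    | zero => omega
    | succ f' =>
      simp only [Nat.toDigitsCore]
      by_cases hz : n / 10 = 0
      · simp [hz]
      · simp only [hz, if_false]
        exact ih f' (n / 10) _ (by omega) (by omega)

lemma toDigits_lt_ten (n : Nat) (h : n < 10) :
    Nat.toDigits 10 n = [Nat.digitChar (n % 10)] := by
  simp [Nat.toDigits, Nat.toDigitsCore, Nat.div_eq_of_lt h]

lemma toDigits_len_step (n : Nat) (h : 10 ≤ n) :
    (Nat.toDigits 10 n).length = (Nat.toDigits 10 (n / 10)).length + 1 := by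
  have hz : n / 10 ≠ 0 := by omega
  have h1 : Nat.toDigits 10 n = Nat.toDigitsCore 10 n (n / 10) [Nat.digitChar (n % 10)] := by
    simp only [Nat.toDigits, Nat.toDigitsCore]
    simp [hz]
  rw [h1, Nat.toDigitsCore_lens_eq,
      toDigitsCore_fuel n (n / 10 + 1) (n / 10) [] (by omega) (by omega)]
  rfl

lemma floordiv_natCast (n : Nat) : PySem.Int.floordiv (n : Int) 10 = ((n / 10 : Nat) : Int) := by
  show Int.fdiv (n : Int) 10 = _
  rw [Int.fdiv_eq_ediv_of_nonneg _ (by norm_num)]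
  omega

lemma keyLoop_eq (n : Nat) : 0 < n → ∀ c : Int,
    keyLoop (n : Int) c = c * 10 ^ (Nat.toDigits 10 n).length := by
  induction n using Nat.strong_induction_on with
  | _ n ih =>
    intro hn c
    rw [keyLoop]
    simp only [show (0 : Int) < (n : Int) from by exact_mod_cast hn, if_pos, floordiv_natCast]
    by_cases h10 : n < 10
    · have hz : n / 10 = 0 := Nat.div_eq_of_lt h10
      rw [hz, keyLoop]
      simp [toDigits_lt_ten n h10]
    · rw [not_lt] at h10
      rw [ih (n / 10) (by omega) (by omega) (c * 10), toDigits_len_step n h10]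
      ring

lemma keyLoop_nonpos (item : Int) (h : item ≤ 0) (c : Int) : keyLoop item c = c := by
  rw [keyLoop]; simp [show ¬ 0 < item from by omega]

lemma alt_len_eq (item : Int) (h : 0 < item) :
    (PySem.Str.len (PySem.Int.toStr item)).toNat = (Nat.toDigits 10 item.toNat).length := by
  have h1 : (PySem.Int.toStr item).toList = PySem.Int.toChars item := PySem.Int.toList_toStr item
  simp only [PySem.Str.len, h1, PySem.Int.toChars, show ¬ item < 0 from by omega, if_false,
    Int.toNat_natCast]

-- ===== VERDICT (by name: the statement is the Claim_ definition above) =====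
theorem key_range_spec : Claim_equal_key_range := by
  intro item _
  unfold Spec_key_range key_range key_range_alt
  by_cases h : item ≤ 0
  · simp [keyLoop_nonpos item h, h]
  · rw [not_le] at h
    have hn : 0 < item.toNat := by omega
    have hcast : ((item.toNat : Nat) : Int) = item := by omega
    have := keyLoop_eq item.toNat hn 1
    rw [hcast] at this
    have hpow : (1 : Int) * 10 ^ (Nat.toDigits 10 item.toNat).length ≠ 1 := by
      have hlen : 0 < (Nat.toDigits 10 item.toNat).length := by
        by_cases h10 : item.toNat < 10
        · simp [toDigits_lt_ten _ h10]
        · rw [toDigits_len_step _ (by omega)]; omega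
      have : (10 : Int) ^ 1 ≤ 10 ^ (Nat.toDigits 10 item.toNat).length :=
        pow_le_pow_right₀ (by norm_num) hlen
      simp at this ⊢
      omega
    simp only [this, hpow, if_false, show ¬ item ≤ 0 from by omega,
      alt_len_eq item h]
    ring
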